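-- pv_equiv track=rewrite | github.com/youngjinhan/PS | programmers/모의고사.py | solution
-- ===== SOURCE A (Python) =====
-- def solution(answers):
--     answer = []
--     pick1=[1,2,3,4,5]  # len=5
--     pick2=[2,1,2,3,2,4,2,5] # len=8
--     pick3=[3,3,1,1,2,2,4,4,5,5] # len=10
--     cnt=[0,0,0]
--     for i in range(len(answers)):
--         if answers[i]==pick1[i%5]:
--             cnt[0]+=1
--         if answers[i]==pick2[i%8]:
--             cnt[1]+=1
--         if answers[i]==pick3[i%10]:
--             cnt[2]+=1
--     for i in range(len(cnt)):
--         if cnt[i]==max(cnt):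
--             answer.append(i+1)
--     return answer
-- ===== SOURCE B (Python) =====
-- def solution(answers):
--     # Bucket answers once by (position mod 40, value): 40 = lcm(5, 8, 10) is the
--     # common period of the three guess patterns, so each pattern's score is just
--     # 40 table lookups, independent of how the answers are scanned afterwards.
--     buckets = {}
--     for i, a in enumerate(answers):
--         key = (i % 40, a)
--         buckets[key] = buckets.get(key, 0) + 1
--     patterns = [[1, 2, 3, 4, 5], [2, 1, 2, 3, 2, 4, 2, 5], [3, 3, 1, 1, 2, 2, 4, 4, 5, 5]]
--     cnt = [sum(buckets.get((r, pat[r % len(pat)]), 0) for r in range(40))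
--            for pat in patterns]
--     m = max(cnt)
--     return [i + 1 for i, c in enumerate(cnt) if c == m]
-- ===== Notes on version B (the rewrite author's own statement) =====
-- stated objective: alternative
-- what changed: Instead of comparing every answer against the three patterns, B builds a frequency table keyed by (position mod 40, value) in one pass (40 = lcm of the pattern periods) and then obtains each pattern's score from 40 table lookups, so the patterns never scan the answers.
import Mathlib
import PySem

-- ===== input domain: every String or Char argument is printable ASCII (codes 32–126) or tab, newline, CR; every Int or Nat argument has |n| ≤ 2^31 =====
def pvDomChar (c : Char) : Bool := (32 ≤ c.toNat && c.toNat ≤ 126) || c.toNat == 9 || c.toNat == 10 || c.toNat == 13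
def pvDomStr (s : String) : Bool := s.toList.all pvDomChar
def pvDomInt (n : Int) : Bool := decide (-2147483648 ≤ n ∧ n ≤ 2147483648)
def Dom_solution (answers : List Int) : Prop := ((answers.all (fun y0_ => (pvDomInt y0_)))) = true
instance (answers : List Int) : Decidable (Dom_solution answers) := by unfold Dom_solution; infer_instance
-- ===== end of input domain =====

-- B replaces A's per-answer pattern comparisons by one bucketing pass into a frequency
-- table keyed by (position mod 40, value) — 40 = lcm of the pattern periods — from which
-- each pattern's score is read off by 40 lookups (objective: alternative algorithm).


-- ===== PORT A =====
-- answer-major: one pass over the indices, updating three counters at once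
def solution (answers : List Int) : List Int :=
  let pick1 : List Int := [1,2,3,4,5]
  let pick2 : List Int := [2,1,2,3,2,4,2,5]
  let pick3 : List Int := [3,3,1,1,2,2,4,4,5,5]
  let cnt : Int × Int × Int :=
    (List.range answers.length).foldl
      (fun c i =>
        let c0 := if answers.getD i 0 = pick1.getD (i % 5) 0 then c.1 + 1 else c.1
        let c1 := if answers.getD i 0 = pick2.getD (i % 8) 0 then c.2.1 + 1 else c.2.1
        let c2 := if answers.getD i 0 = pick3.getD (i % 10) 0 then c.2.2 + 1 else c.2.2
        (c0, c1, c2))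
      (0, 0, 0)
  let m := max cnt.1 (max cnt.2.1 cnt.2.2)   -- max(cnt), recomputed identically each check
  (if cnt.1 = m then [1] else []) ++ (if cnt.2.1 = m then [2] else []) ++
    (if cnt.2.2 = m then [3] else [])

-- ===== PORT B =====
-- one bucketing pass: buckets[(i % 40, a)] += 1; then 40 lookups per pattern
def solution_alt (answers : List Int) : List Int :=
  let buckets : PySem.Dict (Int × Int) Int :=
    (PySem.List.enumerate answers 0).foldl
      (fun d p =>
        let key := (PySem.Int.mod p.1 40, p.2)
        d.insert key (d.getD key 0 + 1))
      PySem.Dict.empty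
  let patterns : List (List Int) := [[1,2,3,4,5],[2,1,2,3,2,4,2,5],[3,3,1,1,2,2,4,4,5,5]]
  let cnt := patterns.map (fun pat =>
    ((PySem.List.pyRange 0 40 1).map
      (fun r => buckets.getD (r, PySem.List.pyGetD pat (PySem.Int.mod r (pat.length : Int)) 0) 0)).sum)
  let m := (PySem.List.max? cnt (fun x => x)).getD 0
  (PySem.List.enumerate cnt 0).foldl (fun acc p => if p.2 = m then acc ++ [p.1 + 1] else acc) []

-- ===== PRECONDITION & SPEC =====
def Spec_solution (answers : List Int) (out : List Int) : Prop := out = solution_alt answers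
instance (answers : List Int) (out : List Int) : Decidable (Spec_solution answers out) := by unfold Spec_solution; infer_instance

-- ===== CLAIM (what is proved, stated in full; the proofs are below) =====
def Claim_equal_solution : Prop := ∀ (answers : List Int), Dom_solution answers → Spec_solution answers (solution answers)

-- ===== LEMMAS AND PROOFS =====

-- the bucket keys B inserts, as a list
def pvKeys (answers : List Int) : List (Int × Int) :=
  (PySem.List.enumerate answers 0).map (fun p => (PySem.Int.mod p.1 40, p.2))

-- B's per-pattern sum of bucket lookups, with the dict replaced by list counts
def Ssum (answers pat : List Int) : Int :=
  ((PySem.List.pyRange 0 40 1).map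
    (fun r => ((pvKeys answers).count (r, PySem.List.pyGetD pat (PySem.Int.mod r (pat.length : Int)) 0) : Int))).sum

-- B's bucket dict is the counter of pvKeys
theorem buckets_eq (answers : List Int) :
    (PySem.List.enumerate answers 0).foldl
      (fun (d : PySem.Dict (Int × Int) Int) p =>
        let key := (PySem.Int.mod p.1 40, p.2)
        d.insert key (d.getD key 0 + 1))
      PySem.Dict.empty
    = PySem.Dict.counter (pvKeys answers) := by
  rw [← PySem.Dict.foldl_insert_getD_add_one_eq_counter, pvKeys, List.foldl_map]

-- exactly one r in range(40) hits the key's residue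
theorem sum_indicator_unique (j : Int) (hj0 : 0 ≤ j) (hj : j < 40) (x : Int) (f : Int → Int) :
    ((PySem.List.pyRange 0 40 1).map
      (fun r => if ((r, f r) : Int × Int) = (j, x) then (1 : Int) else 0)).sum
    = if x = f j then 1 else 0 := by
  rw [PySem.List.pyRange_one_append 0 j 40 hj0 (le_of_lt hj),
      PySem.List.pyRange_one_cons hj]
  rw [List.map_append, List.sum_append, List.map_cons, List.sum_cons]
  have h1 : ((PySem.List.pyRange 0 j 1).map
      (fun r => if ((r, f r) : Int × Int) = (j, x) then (1 : Int) else 0)).sum = 0 := by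
    apply List.sum_eq_zero
    intro y hy
    obtain ⟨r, hr, rfl⟩ := List.mem_map.mp hy
    have := PySem.List.mem_pyRange_one.mp hr
    have : r ≠ j := by omega
    simp [Prod.ext_iff, this]
  have h2 : ((PySem.List.pyRange (j+1) 40 1).map
      (fun r => if ((r, f r) : Int × Int) = (j, x) then (1 : Int) else 0)).sum = 0 := by
    apply List.sum_eq_zero
    intro y hy
    obtain ⟨r, hr, rfl⟩ := List.mem_map.mp hy
    have := PySem.List.mem_pyRange_one.mp hr
    have : r ≠ j := by omega
    simp [Prod.ext_iff, this]
  rw [h1, h2]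
  simp [Prod.ext_iff, eq_comm]

-- appending one answer bumps a pattern's bucket sum by its match indicator
theorem Ssum_append (l : List Int) (x : Int) (pat : List Int)
    (hdvd : pat.length ∣ 40) :
    Ssum (l ++ [x]) pat =
      Ssum l pat + (if x = pat.getD (l.length % pat.length) 0 then 1 else 0) := by
  have hkeys : pvKeys (l ++ [x]) = pvKeys l ++ [(PySem.Int.mod (l.length : Int) 40, x)] := by
    unfold pvKeys
    rw [PySem.List.enumerate_append]
    simp [PySem.List.enumerate_cons, PySem.List.enumerate_nil]
  unfold Ssum
  rw [hkeys]
  have hsplit : ∀ r : Int,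
      ((pvKeys l ++ [(PySem.Int.mod (l.length : Int) 40, x)]).count
        (r, PySem.List.pyGetD pat (PySem.Int.mod r (pat.length : Int)) 0) : Int)
      = ((pvKeys l).count (r, PySem.List.pyGetD pat (PySem.Int.mod r (pat.length : Int)) 0) : Int)
        + (if ((PySem.Int.mod (l.length : Int) 40, x) : Int × Int)
              = (r, PySem.List.pyGetD pat (PySem.Int.mod r (pat.length : Int)) 0) then 1 else 0) := by
    intro r
    rw [List.count_append]
    push_cast
    congr 1
    simp [List.count_cons, beq_iff_eq]
  simp only [hsplit]
  rw [PySem.List.sum_map_add_int]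
  congr 1
  have hmodcast : PySem.Int.mod (l.length : Int) 40 = ((l.length % 40 : Nat) : Int) := by
    exact_mod_cast PySem.Int.mod_natCast l.length 40
  have hb0 : (0 : Int) ≤ PySem.Int.mod (l.length : Int) 40 := by rw [hmodcast]; positivity
  have hb1 : PySem.Int.mod (l.length : Int) 40 < 40 := by
    rw [hmodcast]; exact_mod_cast Nat.mod_lt _ (by omega)
  have := sum_indicator_unique (PySem.Int.mod (l.length : Int) 40) hb0 hb1 x
      (fun r => PySem.List.pyGetD pat (PySem.Int.mod r (pat.length : Int)) 0)
  have hind : (fun r : Int => if ((PySem.Int.mod (l.length : Int) 40, x) : Int × Int)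
        = (r, PySem.List.pyGetD pat (PySem.Int.mod r (pat.length : Int)) 0) then (1:Int) else 0)
      = fun r : Int => if ((r, PySem.List.pyGetD pat (PySem.Int.mod r (pat.length : Int)) 0) : Int × Int)
        = (PySem.Int.mod (l.length : Int) 40, x) then (1:Int) else 0 := by
    funext r; simp [eq_comm]
  rw [hind, this]
  -- evaluate the pattern at the residue: (n % 40) % len = n % len since len ∣ 40
  have hval : PySem.List.pyGetD pat (PySem.Int.mod (PySem.Int.mod (l.length : Int) 40) (pat.length : Int)) 0
      = pat.getD (l.length % pat.length) 0 := by
    rw [hmodcast]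
    have : PySem.Int.mod ((l.length % 40 : Nat) : Int) ((pat.length : Nat) : Int)
        = ((l.length % 40 % pat.length : Nat) : Int) := PySem.Int.mod_natCast _ _
    rw [this, Nat.mod_mod_of_dvd _ hdvd, PySem.List.pyGetD_natCast]
  rw [hval]

-- A's counter triple equals B's three bucket sums
theorem cnt_eq (answers : List Int) :
    (List.range answers.length).foldl
      (fun (c : Int × Int × Int) i =>
        let c0 := if answers.getD i 0 = ([1,2,3,4,5] : List Int).getD (i % 5) 0 then c.1 + 1 else c.1
        let c1 := if answers.getD i 0 = ([2,1,2,3,2,4,2,5] : List Int).getD (i % 8) 0 then c.2.1 + 1 else c.2.1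
        let c2 := if answers.getD i 0 = ([3,3,1,1,2,2,4,4,5,5] : List Int).getD (i % 10) 0 then c.2.2 + 1 else c.2.2
        (c0, c1, c2))
      (0, 0, 0)
    = (Ssum answers [1,2,3,4,5], Ssum answers [2,1,2,3,2,4,2,5],
       Ssum answers [3,3,1,1,2,2,4,4,5,5]) := by
  induction answers using List.reverseRecOn with
  | nil => simp [Ssum, pvKeys, PySem.List.enumerate]
  | append_singleton l x ih =>
      have hlen : (l ++ [x]).length = l.length + 1 := by simp
      rw [hlen, List.range_succ, List.foldl_append]
      have hcong :
          (List.range l.length).foldl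
            (fun (c : Int × Int × Int) i =>
              let c0 := if (l ++ [x]).getD i 0 = ([1,2,3,4,5] : List Int).getD (i % 5) 0 then c.1 + 1 else c.1
              let c1 := if (l ++ [x]).getD i 0 = ([2,1,2,3,2,4,2,5] : List Int).getD (i % 8) 0 then c.2.1 + 1 else c.2.1
              let c2 := if (l ++ [x]).getD i 0 = ([3,3,1,1,2,2,4,4,5,5] : List Int).getD (i % 10) 0 then c.2.2 + 1 else c.2.2
              (c0, c1, c2))
            (0, 0, 0)
          = (List.range l.length).foldl
            (fun (c : Int × Int × Int) i =>
              let c0 := if l.getD i 0 = ([1,2,3,4,5] : List Int).getD (i % 5) 0 then c.1 + 1 else c.1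
              let c1 := if l.getD i 0 = ([2,1,2,3,2,4,2,5] : List Int).getD (i % 8) 0 then c.2.1 + 1 else c.2.1
              let c2 := if l.getD i 0 = ([3,3,1,1,2,2,4,4,5,5] : List Int).getD (i % 10) 0 then c.2.2 + 1 else c.2.2
              (c0, c1, c2))
            (0, 0, 0) := by
        apply List.foldl_ext
        intro acc i hi
        have hi' : i < l.length := List.mem_range.mp hi
        simp [List.getD_eq_getElem?_getD, List.getElem?_append_left hi']
      rw [hcong, ih]
      have hx : (l ++ [x]).getD l.length 0 = x := by
        simp [List.getD_eq_getElem?_getD]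
      simp only [List.foldl_cons, List.foldl_nil, hx]
      rw [Ssum_append l x [1,2,3,4,5] (by decide),
          Ssum_append l x [2,1,2,3,2,4,2,5] (by decide),
          Ssum_append l x [3,3,1,1,2,2,4,4,5,5] (by decide)]
      have h5 : ([1,2,3,4,5] : List Int).length = 5 := rfl
      have h8 : ([2,1,2,3,2,4,2,5] : List Int).length = 8 := rfl
      have h10 : ([3,3,1,1,2,2,4,4,5,5] : List Int).length = 10 := rfl
      rw [h5, h8, h10]
      refine Prod.ext ?_ (Prod.ext ?_ ?_) <;> dsimp only <;> split_ifs <;> omega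

-- ===== VERDICT (by name: the statement is the Claim_ definition above) =====
theorem solution_spec : Claim_equal_solution := by
  intro answers _
  show solution answers = solution_alt answers
  simp only [solution, solution_alt, List.map]
  rw [buckets_eq]
  simp only [PySem.Dict.getD_counter]
  have hB : ∀ pat : List Int,
      ((PySem.List.pyRange 0 40 1).map
        (fun r => ((pvKeys answers).count (r, PySem.List.pyGetD pat (PySem.Int.mod r (pat.length : Int)) 0) : Int))).sum
      = Ssum answers pat := fun _ => rfl
  simp only [hB]
  rw [cnt_eq]
  set a := Ssum answers [1,2,3,4,5] with ha
  set b := Ssum answers [2,1,2,3,2,4,2,5] with hb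
  set c := Ssum answers [3,3,1,1,2,2,4,4,5,5] with hc
  simp only [PySem.List.max?_id_cons, List.foldl_cons, List.foldl_nil, Option.getD_some,
             PySem.List.enumerate_cons, PySem.List.enumerate_nil]
  have hm : ∀ x y z : Int, max (max x y) z = max x (max y z) := max_assoc
  simp only [hm]
  split_ifs <;> simp
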